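-- pv_equiv track=rewrite | github.com/shashjar/advent-of-code | 2022/day18/p2-solution.py | airPocket
-- ===== SOURCE A (Python) =====
-- def airPocket(cubeAdj, cubes, minX, maxX, minY, maxY, minZ, maxZ):
--     sidesBounded = 0
--     x = cubeAdj[0]
--     y = cubeAdj[1]
--     z = cubeAdj[2]
--
--     for boundMinX in range(x, minX - 1, -1):
--         if [boundMinX, y, z] in cubes:
--             sidesBounded += 1
--             break
--     for boundMaxX in range(x, maxX + 1):
--         if [boundMaxX, y, z] in cubes:
--             sidesBounded += 1
--             break
--     for boundMinY in range(y, minY - 1, -1):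
--         if [x, boundMinY, z] in cubes:
--             sidesBounded += 1
--             break
--     for boundMaxY in range(y, maxY + 1):
--         if [x, boundMaxY, z] in cubes:
--             sidesBounded += 1
--             break
--     for boundMinZ in range(z, minZ - 1, -1):
--         if [x, y, boundMinZ] in cubes:
--             sidesBounded += 1
--             break
--     for boundMaxZ in range(z, maxZ + 1):
--         if [x, y, boundMaxZ] in cubes:
--             sidesBounded += 1
--             break
--
--     return sidesBounded == 6
-- ===== SOURCE B (Python) =====
-- def airPocket(cubeAdj, cubes, minX, maxX, minY, maxY, minZ, maxZ):
--     x, y, z = cubeAdj[0], cubeAdj[1], cubeAdj[2]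
--     mX = pX = mY = pY = mZ = pZ = False
--     for c in cubes:
--         if len(c) != 3:
--             continue
--         cx, cy, cz = c
--         if cy == y and cz == z:
--             if minX <= cx <= x:
--                 mX = True
--             if x <= cx <= maxX:
--                 pX = True
--         if cx == x and cz == z:
--             if minY <= cy <= y:
--                 mY = True
--             if y <= cy <= maxY:
--                 pY = True
--         if cx == x and cy == y:
--             if minZ <= cz <= z:
--                 mZ = True
--             if z <= cz <= maxZ:
--                 pZ = True
--     return mX and pX and mY and pY and mZ and pZ
-- ===== Notes on version B (the rewrite author's own statement) =====
-- stated objective: faster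
-- what changed: Replaces the six directional ray-scans over coordinate ranges (each doing a full list membership test per step) with one pass over the cubes list maintaining six boolean bounded-direction flags tested by coordinate comparisons.
import Mathlib
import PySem

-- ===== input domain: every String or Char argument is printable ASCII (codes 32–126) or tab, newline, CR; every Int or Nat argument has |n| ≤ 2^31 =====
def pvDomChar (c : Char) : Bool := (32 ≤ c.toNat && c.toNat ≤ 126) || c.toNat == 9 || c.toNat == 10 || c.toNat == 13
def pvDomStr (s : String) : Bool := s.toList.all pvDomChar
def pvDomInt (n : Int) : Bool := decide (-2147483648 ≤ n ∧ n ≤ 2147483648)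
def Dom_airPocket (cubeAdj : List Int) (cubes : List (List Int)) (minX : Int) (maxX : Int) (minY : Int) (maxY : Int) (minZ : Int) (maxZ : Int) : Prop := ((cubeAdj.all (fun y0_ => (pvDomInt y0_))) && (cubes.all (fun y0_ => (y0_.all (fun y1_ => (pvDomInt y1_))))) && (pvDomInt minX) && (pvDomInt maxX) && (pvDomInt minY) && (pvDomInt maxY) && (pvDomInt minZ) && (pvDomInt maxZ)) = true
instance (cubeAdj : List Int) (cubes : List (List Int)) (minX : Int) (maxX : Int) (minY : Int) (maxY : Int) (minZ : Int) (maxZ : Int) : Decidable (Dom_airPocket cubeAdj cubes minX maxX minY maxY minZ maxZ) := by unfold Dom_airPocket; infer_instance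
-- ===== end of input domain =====

-- B replaces A's six directional ray-scans over coordinate ranges with a single pass
-- over the cubes list maintaining six boolean bounded-direction flags (objective: faster).

-- ===== PORT A =====
-- Each 'for … in range(…): if [..] in cubes: sidesBounded += 1; break' loop is a
-- short-circuit search over the range, i.e. List.any over the pyRange list.
def airPocket (cubeAdj : List Int) (cubes : List (List Int)) (minX : Int) (maxX : Int) (minY : Int) (maxY : Int) (minZ : Int) (maxZ : Int) : Bool :=
  let x := PySem.List.pyGetD cubeAdj 0 0
  let y := PySem.List.pyGetD cubeAdj 1 0
  let z := PySem.List.pyGetD cubeAdj 2 0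
  let s : Int := 0
  let s := if (PySem.List.pyRange x (minX - 1) (-1)).any (fun i => cubes.contains [i, y, z]) then s + 1 else s
  let s := if (PySem.List.pyRange x (maxX + 1) 1).any (fun i => cubes.contains [i, y, z]) then s + 1 else s
  let s := if (PySem.List.pyRange y (minY - 1) (-1)).any (fun i => cubes.contains [x, i, z]) then s + 1 else s
  let s := if (PySem.List.pyRange y (maxY + 1) 1).any (fun i => cubes.contains [x, i, z]) then s + 1 else s
  let s := if (PySem.List.pyRange z (minZ - 1) (-1)).any (fun i => cubes.contains [x, y, i]) then s + 1 else s
  let s := if (PySem.List.pyRange z (maxZ + 1) 1).any (fun i => cubes.contains [x, y, i]) then s + 1 else s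
  s == 6

-- ===== PORT B =====
-- the six per-cube direction tests of Source B's loop body
def pvHitMX (x y z minX : Int) (c : List Int) : Bool :=
  match c with
  | [cx, cy, cz] => cy == y && cz == z && decide (minX ≤ cx ∧ cx ≤ x)
  | _ => false
def pvHitPX (x y z maxX : Int) (c : List Int) : Bool :=
  match c with
  | [cx, cy, cz] => cy == y && cz == z && decide (x ≤ cx ∧ cx ≤ maxX)
  | _ => false
def pvHitMY (x y z minY : Int) (c : List Int) : Bool :=
  match c with
  | [cx, cy, cz] => cx == x && cz == z && decide (minY ≤ cy ∧ cy ≤ y)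
  | _ => false
def pvHitPY (x y z maxY : Int) (c : List Int) : Bool :=
  match c with
  | [cx, cy, cz] => cx == x && cz == z && decide (y ≤ cy ∧ cy ≤ maxY)
  | _ => false
def pvHitMZ (x y z minZ : Int) (c : List Int) : Bool :=
  match c with
  | [cx, cy, cz] => cx == x && cy == y && decide (minZ ≤ cz ∧ cz ≤ z)
  | _ => false
def pvHitPZ (x y z maxZ : Int) (c : List Int) : Bool :=
  match c with
  | [cx, cy, cz] => cx == x && cy == y && decide (z ≤ cz ∧ cz ≤ maxZ)
  | _ => false

def pvStep (x y z minX maxX minY maxY minZ maxZ : Int)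
    (f : Bool × Bool × Bool × Bool × Bool × Bool) (c : List Int) :
    Bool × Bool × Bool × Bool × Bool × Bool :=
  (f.1 || pvHitMX x y z minX c,
   f.2.1 || pvHitPX x y z maxX c,
   f.2.2.1 || pvHitMY x y z minY c,
   f.2.2.2.1 || pvHitPY x y z maxY c,
   f.2.2.2.2.1 || pvHitMZ x y z minZ c,
   f.2.2.2.2.2 || pvHitPZ x y z maxZ c)

def airPocket_alt (cubeAdj : List Int) (cubes : List (List Int)) (minX : Int) (maxX : Int) (minY : Int) (maxY : Int) (minZ : Int) (maxZ : Int) : Bool :=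
  let x := PySem.List.pyGetD cubeAdj 0 0
  let y := PySem.List.pyGetD cubeAdj 1 0
  let z := PySem.List.pyGetD cubeAdj 2 0
  let f := cubes.foldl (pvStep x y z minX maxX minY maxY minZ maxZ)
             (false, false, false, false, false, false)
  f.1 && f.2.1 && f.2.2.1 && f.2.2.2.1 && f.2.2.2.2.1 && f.2.2.2.2.2

-- ===== PRECONDITION & SPEC =====
-- A raises IndexError (cubeAdj[0..2]) when cubeAdj has fewer than three entries.
def Pre_airPocket (cubeAdj : List Int) (cubes : List (List Int)) (minX : Int) (maxX : Int) (minY : Int) (maxY : Int) (minZ : Int) (maxZ : Int) : Prop := 3 ≤ cubeAdj.length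
instance (cubeAdj : List Int) (cubes : List (List Int)) (minX : Int) (maxX : Int) (minY : Int) (maxY : Int) (minZ : Int) (maxZ : Int) : Decidable (Pre_airPocket cubeAdj cubes minX maxX minY maxY minZ maxZ) := by unfold Pre_airPocket; infer_instance
def pvWitness_airPocket : List Int × List (List Int) × Int × Int × Int × Int × Int × Int :=
  ([1, 1, 1], [[0, 1, 1], [2, 1, 1], [1, 0, 1], [1, 2, 1], [1, 1, 0], [1, 1, 2]], 0, 2, 0, 2, 0, 2)

def Spec_airPocket (cubeAdj : List Int) (cubes : List (List Int)) (minX : Int) (maxX : Int) (minY : Int) (maxY : Int) (minZ : Int) (maxZ : Int) (out : Bool) : Prop := out = airPocket_alt cubeAdj cubes minX maxX minY maxY minZ maxZ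
instance (cubeAdj : List Int) (cubes : List (List Int)) (minX : Int) (maxX : Int) (minY : Int) (maxY : Int) (minZ : Int) (maxZ : Int) (out : Bool) : Decidable (Spec_airPocket cubeAdj cubes minX maxX minY maxY minZ maxZ out) := by unfold Spec_airPocket; infer_instance

-- ===== CLAIM (what is proved, stated in full; the proofs are below) =====
def Claim_equal_airPocket : Prop := ∀ (cubeAdj : List Int) (cubes : List (List Int)) (minX : Int) (maxX : Int) (minY : Int) (maxY : Int) (minZ : Int) (maxZ : Int), Dom_airPocket cubeAdj cubes minX maxX minY maxY minZ maxZ → Pre_airPocket cubeAdj cubes minX maxX minY maxY minZ maxZ → Spec_airPocket cubeAdj cubes minX maxX minY maxY minZ maxZ (airPocket cubeAdj cubes minX maxX minY maxY minZ maxZ)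

-- ===== LEMMAS AND PROOFS =====

-- the single fold of B computes, per component, an existence test over the cube list
theorem pvFold_flags (x y z minX maxX minY maxY minZ maxZ : Int)
    (cubes : List (List Int)) (init : Bool × Bool × Bool × Bool × Bool × Bool) :
    cubes.foldl (pvStep x y z minX maxX minY maxY minZ maxZ) init =
      (init.1 || cubes.any (pvHitMX x y z minX),
       init.2.1 || cubes.any (pvHitPX x y z maxX),
       init.2.2.1 || cubes.any (pvHitMY x y z minY),
       init.2.2.2.1 || cubes.any (pvHitPY x y z maxY),
       init.2.2.2.2.1 || cubes.any (pvHitMZ x y z minZ),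
       init.2.2.2.2.2 || cubes.any (pvHitPZ x y z maxZ)) := by
  induction cubes generalizing init with
  | nil => simp
  | cons c cs ih => simp [ih, pvStep, Bool.or_assoc]

-- the four shapes a cube can fail to match [cx, cy, cz]
theorem pvHit_cases (c : List Int) (P : List Int → Prop)
    (h3 : ∀ a b d : Int, P [a, b, d])
    (h0 : P []) (h1 : ∀ a : Int, P [a]) (h2 : ∀ a b : Int, P [a, b])
    (h4 : ∀ (a b d : Int) (e : Int) (r : List Int), P (a :: b :: d :: e :: r)) : P c := by
  match c with
  | [] => exact h0
  | [a] => exact h1 a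
  | [a, b] => exact h2 a b
  | [a, b, d] => exact h3 a b d
  | a :: b :: d :: e :: r => exact h4 a b d e r

theorem pvScanDown (a lo y z : Int) (cubes : List (List Int)) :
    (PySem.List.pyRange a (lo - 1) (-1)).any (fun i => cubes.contains [i, y, z]) =
      cubes.any (pvHitMX a y z lo) := by
  rw [Bool.eq_iff_iff]
  simp only [List.any_eq_true, PySem.List.mem_pyRange_neg_one, List.contains_iff_mem]
  constructor
  · rintro ⟨i, ⟨h1, h2⟩, hmem⟩
    exact ⟨[i, y, z], hmem, by simp [pvHitMX]; omega⟩
  · rintro ⟨c, hc, hp⟩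
    induction c using pvHit_cases with
    | h3 cx cy cz =>
      simp only [pvHitMX, Bool.and_eq_true, beq_iff_eq, decide_eq_true_eq] at hp
      obtain ⟨⟨h1, h2⟩, h3, h4⟩ := hp
      exact ⟨cx, ⟨by omega, h4⟩, by rw [← h1, ← h2]; exact hc⟩
    | h0 => simp [pvHitMX] at hp
    | h1 a => simp [pvHitMX] at hp
    | h2 a b => simp [pvHitMX] at hp
    | h4 a b d e r => simp [pvHitMX] at hp

theorem pvScanUp (a hi y z : Int) (cubes : List (List Int)) :
    (PySem.List.pyRange a (hi + 1) 1).any (fun i => cubes.contains [i, y, z]) =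
      cubes.any (pvHitPX a y z hi) := by
  rw [Bool.eq_iff_iff]
  simp only [List.any_eq_true, PySem.List.mem_pyRange_one, List.contains_iff_mem]
  constructor
  · rintro ⟨i, ⟨h1, h2⟩, hmem⟩
    exact ⟨[i, y, z], hmem, by simp [pvHitPX]; omega⟩
  · rintro ⟨c, hc, hp⟩
    induction c using pvHit_cases with
    | h3 cx cy cz =>
      simp only [pvHitPX, Bool.and_eq_true, beq_iff_eq, decide_eq_true_eq] at hp
      obtain ⟨⟨h1, h2⟩, h3, h4⟩ := hp
      exact ⟨cx, ⟨h3, by omega⟩, by rw [← h1, ← h2]; exact hc⟩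
    | h0 => simp [pvHitPX] at hp
    | h1 a => simp [pvHitPX] at hp
    | h2 a b => simp [pvHitPX] at hp
    | h4 a b d e r => simp [pvHitPX] at hp

theorem pvScanDownY (a lo x z : Int) (cubes : List (List Int)) :
    (PySem.List.pyRange a (lo - 1) (-1)).any (fun i => cubes.contains [x, i, z]) =
      cubes.any (pvHitMY x a z lo) := by
  rw [Bool.eq_iff_iff]
  simp only [List.any_eq_true, PySem.List.mem_pyRange_neg_one, List.contains_iff_mem]
  constructor
  · rintro ⟨i, ⟨h1, h2⟩, hmem⟩
    exact ⟨[x, i, z], hmem, by simp [pvHitMY]; omega⟩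
  · rintro ⟨c, hc, hp⟩
    induction c using pvHit_cases with
    | h3 cx cy cz =>
      simp only [pvHitMY, Bool.and_eq_true, beq_iff_eq, decide_eq_true_eq] at hp
      obtain ⟨⟨h1, h2⟩, h3, h4⟩ := hp
      exact ⟨cy, ⟨by omega, h4⟩, by rw [← h1, ← h2]; exact hc⟩
    | h0 => simp [pvHitMY] at hp
    | h1 a => simp [pvHitMY] at hp
    | h2 a b => simp [pvHitMY] at hp
    | h4 a b d e r => simp [pvHitMY] at hp

theorem pvScanUpY (a hi x z : Int) (cubes : List (List Int)) :
    (PySem.List.pyRange a (hi + 1) 1).any (fun i => cubes.contains [x, i, z]) =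
      cubes.any (pvHitPY x a z hi) := by
  rw [Bool.eq_iff_iff]
  simp only [List.any_eq_true, PySem.List.mem_pyRange_one, List.contains_iff_mem]
  constructor
  · rintro ⟨i, ⟨h1, h2⟩, hmem⟩
    exact ⟨[x, i, z], hmem, by simp [pvHitPY]; omega⟩
  · rintro ⟨c, hc, hp⟩
    induction c using pvHit_cases with
    | h3 cx cy cz =>
      simp only [pvHitPY, Bool.and_eq_true, beq_iff_eq, decide_eq_true_eq] at hp
      obtain ⟨⟨h1, h2⟩, h3, h4⟩ := hp
      exact ⟨cy, ⟨h3, by omega⟩, by rw [← h1, ← h2]; exact hc⟩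
    | h0 => simp [pvHitPY] at hp
    | h1 a => simp [pvHitPY] at hp
    | h2 a b => simp [pvHitPY] at hp
    | h4 a b d e r => simp [pvHitPY] at hp

theorem pvScanDownZ (a lo x y : Int) (cubes : List (List Int)) :
    (PySem.List.pyRange a (lo - 1) (-1)).any (fun i => cubes.contains [x, y, i]) =
      cubes.any (pvHitMZ x y a lo) := by
  rw [Bool.eq_iff_iff]
  simp only [List.any_eq_true, PySem.List.mem_pyRange_neg_one, List.contains_iff_mem]
  constructor
  · rintro ⟨i, ⟨h1, h2⟩, hmem⟩
    exact ⟨[x, y, i], hmem, by simp [pvHitMZ]; omega⟩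
  · rintro ⟨c, hc, hp⟩
    induction c using pvHit_cases with
    | h3 cx cy cz =>
      simp only [pvHitMZ, Bool.and_eq_true, beq_iff_eq, decide_eq_true_eq] at hp
      obtain ⟨⟨h1, h2⟩, h3, h4⟩ := hp
      exact ⟨cz, ⟨by omega, h4⟩, by rw [← h1, ← h2]; exact hc⟩
    | h0 => simp [pvHitMZ] at hp
    | h1 a => simp [pvHitMZ] at hp
    | h2 a b => simp [pvHitMZ] at hp
    | h4 a b d e r => simp [pvHitMZ] at hp

theorem pvScanUpZ (a hi x y : Int) (cubes : List (List Int)) :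
    (PySem.List.pyRange a (hi + 1) 1).any (fun i => cubes.contains [x, y, i]) =
      cubes.any (pvHitPZ x y a hi) := by
  rw [Bool.eq_iff_iff]
  simp only [List.any_eq_true, PySem.List.mem_pyRange_one, List.contains_iff_mem]
  constructor
  · rintro ⟨i, ⟨h1, h2⟩, hmem⟩
    exact ⟨[x, y, i], hmem, by simp [pvHitPZ]; omega⟩
  · rintro ⟨c, hc, hp⟩
    induction c using pvHit_cases with
    | h3 cx cy cz =>
      simp only [pvHitPZ, Bool.and_eq_true, beq_iff_eq, decide_eq_true_eq] at hp
      obtain ⟨⟨h1, h2⟩, h3, h4⟩ := hp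
      exact ⟨cz, ⟨h3, by omega⟩, by rw [← h1, ← h2]; exact hc⟩
    | h0 => simp [pvHitPZ] at hp
    | h1 a => simp [pvHitPZ] at hp
    | h2 a b => simp [pvHitPZ] at hp
    | h4 a b d e r => simp [pvHitPZ] at hp

-- ===== VERDICT (by name: the statement is the Claim_ definition above) =====
theorem airPocket_spec : Claim_equal_airPocket := by
  intro cubeAdj cubes minX maxX minY maxY minZ maxZ _ _
  unfold Spec_airPocket airPocket airPocket_alt
  simp only [pvFold_flags, pvScanDown, pvScanUp, pvScanDownY, pvScanUpY, pvScanDownZ, pvScanUpZ,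
    Bool.false_or]
  generalize cubes.any (pvHitMX _ _ _ _) = b1
  generalize cubes.any (pvHitPX _ _ _ _) = b2
  generalize cubes.any (pvHitMY _ _ _ _) = b3
  generalize cubes.any (pvHitPY _ _ _ _) = b4
  generalize cubes.any (pvHitMZ _ _ _ _) = b5
  generalize cubes.any (pvHitPZ _ _ _ _) = b6
  cases b1 <;> cases b2 <;> cases b3 <;> cases b4 <;> cases b5 <;> cases b6 <;> decide
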